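-- pv_equiv track=rewrite | github.com/joe-cooney02/quantum_tsp_solver | visualization_algorithms.py | compare_tour_orders
-- ===== SOURCE A (Python) =====
-- def compare_tour_orders(base_tour, other_tour):
--     """
--     Compare two tours and identify nodes that are in different relative positions.
--
--     Parameters:
--     -----------
--     base_tour : list
--         The reference tour (from brute force)
--     other_tour : list
--         The tour to compare against the base
--
--     Returns:
--     --------
--     set: Nodes that appear in different relative order
--     """
--     # Remove the last node if it's a return to start
--     if len(base_tour) > 1 and base_tour[0] == base_tour[-1]:
--         base_tour = base_tour[:-1]
--     if len(other_tour) > 1 and other_tour[0] == other_tour[-1]: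
--         other_tour = other_tour[:-1]
--
--     # Find the index of each node in both tours
--     base_indices = {node: i for i, node in enumerate(base_tour)}
--     other_indices = {node: i for i, node in enumerate(other_tour)}
--
--     # Check for nodes that are out of order
--     out_of_order = set()
--
--     for i, node1 in enumerate(base_tour):
--         for j, node2 in enumerate(base_tour):
--             if i < j:  # node1 comes before node2 in base tour
--                 # Check if the relative order is preserved in other tour
--                 if node1 in other_indices and node2 in other_indices:
--                     if other_indices[node1] > other_indices[node2]:
--                         # Order is reversed in other tour
--                         out_of_order.add(node1)
--                         out_of_order.add(node2)
--
--     return out_of_order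
-- ===== SOURCE B (Python) =====
-- def compare_tour_orders(base_tour, other_tour):
--     """
--     Compare two tours and return the set of nodes that appear in a different
--     relative order.
--
--     Only a node holding the running maximum of other-tour positions can be the
--     earlier endpoint of a new inversion (any later node at a smaller other-tour
--     position is already inverted against the current maximum), so instead of
--     scanning all pairs we scan forward only from each running-maximum node.
--     """
--     if len(base_tour) > 1 and base_tour[0] == base_tour[-1]:
--         base_tour = base_tour[:-1]
--     if len(other_tour) > 1 and other_tour[0] == other_tour[-1]:
--         other_tour = other_tour[:-1]
--
--     other_indices = {node: i for i, node in enumerate(other_tour)}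
--     positions = [(node, other_indices[node]) for node in base_tour
--                  if node in other_indices]
--
--     out_of_order = set()
--     best = None
--     for i, (node, pos) in enumerate(positions):
--         if best is None or pos > best:
--             for partner, p in positions[i + 1:]:
--                 if p < pos:
--                     out_of_order.add(node)
--                     out_of_order.add(partner)
--             best = pos
--     return out_of_order
-- ===== Notes on version B (the rewrite author's own statement) =====
-- stated objective: faster
-- what changed: Precomputes the other-tour position of each base node once, then replaces A's all-pairs scan (with dict lookups per pair) by a single forward pass that scans ahead only from nodes holding the running maximum of other-tour positions, since only those can be the earlier endpoint of a new inversion.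
import Mathlib
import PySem

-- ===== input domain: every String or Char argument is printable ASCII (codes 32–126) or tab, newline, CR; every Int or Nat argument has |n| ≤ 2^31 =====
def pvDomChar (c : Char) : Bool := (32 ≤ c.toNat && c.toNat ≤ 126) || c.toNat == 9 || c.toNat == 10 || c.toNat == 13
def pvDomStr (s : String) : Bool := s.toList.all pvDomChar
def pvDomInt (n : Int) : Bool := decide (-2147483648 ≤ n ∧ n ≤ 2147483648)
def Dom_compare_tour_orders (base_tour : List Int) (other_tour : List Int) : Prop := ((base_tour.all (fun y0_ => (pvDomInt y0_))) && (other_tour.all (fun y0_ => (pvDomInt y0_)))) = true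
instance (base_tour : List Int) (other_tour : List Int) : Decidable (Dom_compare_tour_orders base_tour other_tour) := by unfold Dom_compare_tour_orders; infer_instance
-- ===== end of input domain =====

-- B precomputes each base node's other-tour position once and scans forward only
-- from running-maximum nodes instead of over all pairs (objective: faster).
-- ===== PORT A =====
-- Shared transliteration helpers (both Pythons contain these identical lines):
-- 'if len(l) > 1 and l[0] == l[-1]: l = l[:-1]'
def pvTrim (l : List Int) : List Int :=
  if 1 < l.length ∧ PySem.List.pyGet? l 0 = PySem.List.pyGet? l (-1)
  then PySem.List.slice l none (some (-1)) else l

-- '{node: i for i, node in enumerate(l)}'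
def pvIndexDict (l : List Int) : PySem.Dict Int Int :=
  (PySem.List.enumerate l).foldl (fun d p => PySem.Dict.insert d p.2 p.1) PySem.Dict.empty

def compare_tour_orders (base_tour : List Int) (other_tour : List Int) : List Int :=
  let base := pvTrim base_tour
  let other := pvTrim other_tour
  let _base_indices := pvIndexDict base   -- computed and unused, as in the Python
  let oi := pvIndexDict other
  (PySem.List.enumerate base).foldl
    (fun s pi =>
      (PySem.List.enumerate base).foldl
        (fun s pj =>
          if pi.1 < pj.1 then
            match PySem.Dict.get? oi pi.2, PySem.Dict.get? oi pj.2 with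
            | some a, some b => if b < a then PySem.Set.add (PySem.Set.add s pi.2) pj.2 else s
            | _, _ => s
          else s) s)
    (PySem.Set.empty : PySem.Set Int)

-- ===== PORT B =====
def compare_tour_orders_alt (base_tour : List Int) (other_tour : List Int) : List Int :=
  let base := pvTrim base_tour
  let other := pvTrim other_tour
  let oi := pvIndexDict other
  -- 'positions = [(node, other_indices[node]) for node in base_tour if node in other_indices]'
  let positions : List (Int × Int) :=
    base.filterMap (fun node => (PySem.Dict.get? oi node).map (fun v => (node, v)))
  -- state: (out_of_order, best)
  let st := (PySem.List.enumerate positions).foldl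
    (fun (st : PySem.Set Int × Option Int) p =>
      if (match st.2 with | none => true | some b => decide (b < p.2.2))
      then
        ((PySem.List.slice positions (some (p.1 + 1)) none).foldl
            (fun s q =>
              if q.2 < p.2.2 then PySem.Set.add (PySem.Set.add s p.2.1) q.1 else s)
            st.1,
          some p.2.2)
      else st)
    ((PySem.Set.empty : PySem.Set Int), (none : Option Int))
  st.1

-- ===== PRECONDITION & SPEC =====
def Spec_compare_tour_orders (base_tour : List Int) (other_tour : List Int) (out : List Int) : Prop := out = compare_tour_orders_alt base_tour other_tour
instance (base_tour : List Int) (other_tour : List Int) (out : List Int) : Decidable (Spec_compare_tour_orders base_tour other_tour out) := by unfold Spec_compare_tour_orders; infer_instance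

-- ===== CLAIM (what is proved, stated in full; the proofs are below) =====
def Claim_equal_compare_tour_orders : Prop := ∀ (base_tour : List Int) (other_tour : List Int), Dom_compare_tour_orders base_tour other_tour → Spec_compare_tour_orders base_tour other_tour (compare_tour_orders base_tour other_tour)

-- ===== LEMMAS AND PROOFS =====

-- proof-side view of 'positions' (also what A's dict lookups amount to)
def presOf (oi : PySem.Dict Int Int) (l : List Int) : List (Int × Int) :=
  l.filterMap (fun node => (PySem.Dict.get? oi node).map (fun v => (node, v)))

-- ---------- A-side: from the nested enumerate loop to pRec over presOf ----------
def aStep (oi : PySem.Dict Int Int) (x : Int) (s : PySem.Set Int) (y : Int) : PySem.Set Int :=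
  match PySem.Dict.get? oi x, PySem.Dict.get? oi y with
  | some a, some b => if b < a then PySem.Set.add (PySem.Set.add s x) y else s
  | _, _ => s

def aRec (oi : PySem.Dict Int Int) : List Int → PySem.Set Int → PySem.Set Int
  | [], s => s
  | x :: xs, s => aRec oi xs (xs.foldl (aStep oi x) s)

def pStep (x a : Int) (s : PySem.Set Int) (q : Int × Int) : PySem.Set Int :=
  if q.2 < a then PySem.Set.add (PySem.Set.add s x) q.1 else s

def pRec : List (Int × Int) → PySem.Set Int → PySem.Set Int
  | [], s => s
  | (x, a) :: ps, s => pRec ps (ps.foldl (pStep x a) s)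

-- inner loop over full enumerate with 'i < j' guard = plain loop over the suffix
theorem inner_guard_fold (step : PySem.Set Int → Int → PySem.Set Int) (l : List Int) :
    ∀ (n k : Nat) (s : PySem.Set Int),
      (PySem.List.enumerate l (n : Int)).foldl
          (fun s q => if (k : Int) < q.1 then step s q.2 else s) s
        = (l.drop (k + 1 - n)).foldl step s := by
  induction l with
  | nil => intro n k s; simp [PySem.List.enumerate_nil]
  | cons x xs ih =>
    intro n k s
    rw [PySem.List.enumerate_cons, List.foldl_cons]
    have hcast : ((n : Int) + 1) = ((n + 1 : Nat) : Int) := by push_cast; ring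
    rw [hcast, ih (n + 1) k]
    by_cases h : n ≤ k
    · have : ¬ ((k : Int) < (n : Int)) := by exact_mod_cast not_lt.mpr h
      rw [if_neg this]
      have h1 : k + 1 - n = (k - n) + 1 := by omega
      have h2 : k + 1 - (n + 1) = k - n := by omega
      rw [h1, h2, List.drop_succ_cons]
    · have : ((k : Int) < (n : Int)) := by exact_mod_cast not_le.mp h
      rw [if_pos this]
      have h1 : k + 1 - n = 0 := by omega
      have h2 : k + 1 - (n + 1) = 0 := by omega
      rw [h1, h2, List.drop_zero, List.drop_zero, List.foldl_cons]

theorem outer_tails (oi : PySem.Dict Int Int) (L : List Int) :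
    ∀ (l : List Int) (n : Nat), L.drop n = l → ∀ (s : PySem.Set Int),
      (PySem.List.enumerate l (n : Int)).foldl
          (fun s p => (L.drop (p.1.toNat + 1)).foldl (aStep oi p.2) s) s
        = aRec oi l s := by
  intro l
  induction l with
  | nil => intro n _ s; simp [PySem.List.enumerate_nil, aRec]
  | cons x xs ih =>
    intro n hdrop s
    rw [PySem.List.enumerate_cons, List.foldl_cons]
    have hxs : L.drop (n + 1) = xs := by
      have h1 : L.drop (n + 1) = (L.drop n).drop 1 := by
        rw [List.drop_drop]
      rw [h1, hdrop, List.drop_one, List.tail_cons]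
    have hcast : ((n : Int) + 1) = ((n + 1 : Nat) : Int) := by push_cast; ring
    rw [hcast, ih (n + 1) hxs]
    have hn : ((n : Int)).toNat = n := Int.toNat_natCast n
    rw [aRec]
    congr 1
    rw [hn, hxs]

theorem foldl_const {α β : Type} (f : β → α → β) (l : List α) (s : β)
    (h : ∀ s x, f s x = s) : l.foldl f s = s := by
  induction l generalizing s with
  | nil => rfl
  | cons x xs ih => rw [List.foldl_cons, h]; exact ih s

theorem fold_aStep_eq_presOf (oi : PySem.Dict Int Int) (x : Int) (a : Int)
    (hx : PySem.Dict.get? oi x = some a) (l : List Int) :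
    ∀ s : PySem.Set Int, l.foldl (aStep oi x) s = (presOf oi l).foldl (pStep x a) s := by
  induction l with
  | nil => intro s; rfl
  | cons y ys ih =>
    intro s
    rw [List.foldl_cons]
    cases hy : PySem.Dict.get? oi y with
    | none =>
      have : aStep oi x s y = s := by simp [aStep, hx, hy]
      rw [this, ih]
      simp only [presOf, List.filterMap_cons, hy, Option.map_none]
    | some b =>
      simp only [presOf, List.filterMap_cons, hy, Option.map_some]
      rw [List.foldl_cons, ih]
      have : aStep oi x s y = pStep x a s (y, b) := by simp [aStep, hx, hy, pStep]
      rw [this]; rfl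

theorem aRec_eq_pRec (oi : PySem.Dict Int Int) (l : List Int) :
    ∀ s : PySem.Set Int, aRec oi l s = pRec (presOf oi l) s := by
  induction l with
  | nil => intro s; rfl
  | cons x xs ih =>
    intro s
    rw [aRec]
    cases hx : PySem.Dict.get? oi x with
    | none =>
      rw [foldl_const _ _ _ (fun s y => by simp [aStep, hx]), ih]
      simp only [presOf, List.filterMap_cons, hx, Option.map_none]
    | some a =>
      rw [fold_aStep_eq_presOf oi x a hx, ih]
      simp only [presOf, List.filterMap_cons, hx, Option.map_some]
      rfl

theorem portA_eq (bt ot : List Int) :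
    compare_tour_orders bt ot
      = pRec (presOf (pvIndexDict (pvTrim ot)) (pvTrim bt)) PySem.Set.empty := by
  have step1 :
      compare_tour_orders bt ot
        = (PySem.List.enumerate (pvTrim bt)).foldl
            (fun s (pi : Int × Int) =>
              ((pvTrim bt).drop (pi.1.toNat + 1)).foldl
                (aStep (pvIndexDict (pvTrim ot)) pi.2) s) PySem.Set.empty := by
    show (PySem.List.enumerate (pvTrim bt)).foldl _ PySem.Set.empty = _
    apply PySem.List.foldl_congr_mem
    intro acc pi hpi
    rw [PySem.List.mem_enumerate_iff] at hpi
    obtain ⟨k, hk, rfl⟩ := hpi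
    simp only [zero_add, Int.toNat_natCast]
    have := inner_guard_fold (aStep (pvIndexDict (pvTrim ot)) ((pvTrim bt)[k])) (pvTrim bt) 0 k acc
    simpa using this
  have h2 := outer_tails (pvIndexDict (pvTrim ot)) (pvTrim bt) (pvTrim bt) 0
      List.drop_zero PySem.Set.empty
  simp only [Nat.cast_zero] at h2
  rw [step1, h2, aRec_eq_pRec]

-- ---------- B-side: from the enumerate/slice loop to bRecP over presOf ----------
def bRecP : Option Int → List (Int × Int) → PySem.Set Int → PySem.Set Int × Option Int
  | b, [], s => (s, b)
  | b, (x, a) :: tl, s =>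
    if (match b with | none => true | some m => decide (m < a))
    then bRecP (some a) tl (tl.foldl (pStep x a) s)
    else bRecP b tl s

theorem outer_tails_B (L : List (Int × Int)) :
    ∀ (l : List (Int × Int)) (n : Nat), L.drop n = l →
      ∀ (st : PySem.Set Int × Option Int),
      (PySem.List.enumerate l (n : Int)).foldl
          (fun st p =>
            if (match st.2 with | none => true | some b => decide (b < p.2.2))
            then ((L.drop (p.1.toNat + 1)).foldl (pStep p.2.1 p.2.2) st.1, some p.2.2)
            else st) st
        = bRecP st.2 l st.1 := by
  intro l
  induction l with
  | nil => intro n _ st; simp [PySem.List.enumerate_nil, bRecP]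
  | cons xa tl ih =>
    intro n hdrop st
    obtain ⟨x, a⟩ := xa
    rw [PySem.List.enumerate_cons, List.foldl_cons]
    have htl : L.drop (n + 1) = tl := by
      have h1 : L.drop (n + 1) = (L.drop n).drop 1 := by rw [List.drop_drop]
      rw [h1, hdrop, List.drop_one, List.tail_cons]
    have hcast : ((n : Int) + 1) = ((n + 1 : Nat) : Int) := by push_cast; ring
    have hn : ((n : Int)).toNat = n := Int.toNat_natCast n
    rw [hcast]
    by_cases hc : (match st.2 with | none => true | some b => decide (b < a)) = true
    · rw [if_pos hc, ih (n + 1) htl]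
      simp only [hn, htl]
      simp only [bRecP, hc, if_pos]
    · rw [if_neg hc, ih (n + 1) htl]
      simp only [bRecP, hc, Bool.false_eq_true, if_false]

theorem portB_eq (bt ot : List Int) :
    compare_tour_orders_alt bt ot
      = (bRecP none (presOf (pvIndexDict (pvTrim ot)) (pvTrim bt)) PySem.Set.empty).1 := by
  have halt : compare_tour_orders_alt bt ot
      = ((PySem.List.enumerate (presOf (pvIndexDict (pvTrim ot)) (pvTrim bt))).foldl
          (fun (st : PySem.Set Int × Option Int) p =>
            if (match st.2 with | none => true | some b => decide (b < p.2.2))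
            then
              ((PySem.List.slice (presOf (pvIndexDict (pvTrim ot)) (pvTrim bt))
                  (some (p.1 + 1)) none).foldl
                  (fun s q =>
                    if q.2 < p.2.2 then PySem.Set.add (PySem.Set.add s p.2.1) q.1 else s)
                  st.1,
                some p.2.2)
            else st)
          ((PySem.Set.empty : PySem.Set Int), (none : Option Int))).1 := rfl
  have step1 :
      ((PySem.List.enumerate (presOf (pvIndexDict (pvTrim ot)) (pvTrim bt))).foldl
          (fun (st : PySem.Set Int × Option Int) p =>
            if (match st.2 with | none => true | some b => decide (b < p.2.2))
            then
              ((PySem.List.slice (presOf (pvIndexDict (pvTrim ot)) (pvTrim bt))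
                  (some (p.1 + 1)) none).foldl
                  (fun s q =>
                    if q.2 < p.2.2 then PySem.Set.add (PySem.Set.add s p.2.1) q.1 else s)
                  st.1,
                some p.2.2)
            else st)
          ((PySem.Set.empty : PySem.Set Int), (none : Option Int)))
        = ((PySem.List.enumerate (presOf (pvIndexDict (pvTrim ot)) (pvTrim bt))).foldl
            (fun (st : PySem.Set Int × Option Int) p =>
              if (match st.2 with | none => true | some b => decide (b < p.2.2))
              then (((presOf (pvIndexDict (pvTrim ot)) (pvTrim bt)).drop (p.1.toNat + 1)).foldl
                      (pStep p.2.1 p.2.2) st.1, some p.2.2)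
              else st)
            ((PySem.Set.empty : PySem.Set Int), (none : Option Int))) := by
    apply PySem.List.foldl_congr_mem
    intro acc p hp
    rw [PySem.List.mem_enumerate_iff] at hp
    obtain ⟨k, hk, rfl⟩ := hp
    have hsl : PySem.List.slice (presOf (pvIndexDict (pvTrim ot)) (pvTrim bt))
        (some (((0 : Int) + (k : Int)) + 1)) none
        = (presOf (pvIndexDict (pvTrim ot)) (pvTrim bt)).drop ((((0 : Int) + (k : Int))).toNat + 1) := by
      rw [PySem.List.slice_from]
      congr 1
      omega
    rw [hsl]
    rfl
  have h2 := outer_tails_B (presOf (pvIndexDict (pvTrim ot)) (pvTrim bt))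
      (presOf (pvIndexDict (pvTrim ot)) (pvTrim bt)) 0 List.drop_zero
      ((PySem.Set.empty : PySem.Set Int), (none : Option Int))
  simp only [Nat.cast_zero] at h2
  rw [halt, step1, h2]

-- ---------- membership facts about the inner fold ----------
theorem fold_pStep_mono (x a : Int) (l : List (Int × Int)) :
    ∀ (s : PySem.Set Int) (y : Int), y ∈ s → y ∈ l.foldl (pStep x a) s := by
  induction l with
  | nil => intro s y h; exact h
  | cons q tl ih =>
    intro s y h
    rw [List.foldl_cons]
    apply ih
    unfold pStep
    split_ifs with hq
    · exact (PySem.Set.mem_add _ _ _).mpr (Or.inl ((PySem.Set.mem_add _ _ _).mpr (Or.inl h)))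
    · exact h

theorem fold_pStep_mem_self (x a : Int) (l : List (Int × Int)) :
    ∀ (s : PySem.Set Int), (∃ q ∈ l, q.2 < a) → x ∈ l.foldl (pStep x a) s := by
  induction l with
  | nil => rintro s ⟨q, hq, _⟩; cases hq
  | cons q tl ih =>
    rintro s ⟨q', hq', hlt⟩
    rw [List.foldl_cons]
    rcases List.mem_cons.mp hq' with rfl | hmem
    · apply fold_pStep_mono
      unfold pStep
      rw [if_pos hlt]
      exact (PySem.Set.mem_add _ _ _).mpr (Or.inl ((PySem.Set.mem_add _ _ _).mpr (Or.inr rfl)))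
    · exact ih _ ⟨q', hmem, hlt⟩

theorem fold_pStep_mem_partner (x a : Int) (l : List (Int × Int)) :
    ∀ (s : PySem.Set Int) (q : Int × Int), q ∈ l → q.2 < a → q.1 ∈ l.foldl (pStep x a) s := by
  induction l with
  | nil => intro s q hq; cases hq
  | cons q0 tl ih =>
    intro s q hq hlt
    rw [List.foldl_cons]
    rcases List.mem_cons.mp hq with rfl | hmem
    · apply fold_pStep_mono
      unfold pStep
      rw [if_pos hlt]
      exact (PySem.Set.mem_add _ _ _).mpr (Or.inr rfl)
    · exact ih _ q hmem hlt

theorem fold_pStep_noop (x a : Int) (l : List (Int × Int)) (s : PySem.Set Int)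
    (h1 : ∀ q ∈ l, q.2 < a → q.1 ∈ s) (h2 : (∃ q ∈ l, q.2 < a) → x ∈ s) :
    l.foldl (pStep x a) s = s := by
  induction l with
  | nil => rfl
  | cons q tl ih =>
    rw [List.foldl_cons]
    have hstep : pStep x a s q = s := by
      unfold pStep
      split_ifs with hq
      · rw [PySem.Set.add_of_mem (h2 ⟨q, List.mem_cons_self, hq⟩),
          PySem.Set.add_of_mem (h1 q List.mem_cons_self hq)]
      · rfl
    rw [hstep]
    exact ih (fun q' hq' => h1 q' (List.mem_cons_of_mem _ hq'))
      (fun ⟨q', hq', hlt⟩ => h2 ⟨q', List.mem_cons_of_mem _ hq', hlt⟩)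

-- ---------- the main equivalence: pRec = bRecP ----------
theorem pRec_eq_bRecP (rest : List (Int × Int)) :
    ∀ (m x0 : Int) (s : PySem.Set Int),
      (∀ p ∈ rest, ∀ q ∈ rest, p.2 = q.2 → p.1 = q.1) →
      (∀ q ∈ rest, q.2 = m → q.1 = x0) →
      ((∃ q ∈ rest, q.2 < m) → x0 ∈ s) →
      (∀ q ∈ rest, q.2 < m → q.1 ∈ s) →
      pRec rest s = (bRecP (some m) rest s).1 := by
  induction rest with
  | nil => intro m x0 s _ _ _ _; rfl
  | cons xa tl ih =>
    intro m x0 s hinj hx0 hC1 hC2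
    obtain ⟨x, a⟩ := xa
    rw [pRec, bRecP]
    by_cases h : m < a
    · rw [if_pos (by simp [h])]
      exact ih a x (tl.foldl (pStep x a) s)
        (fun p hp q hq => hinj p (List.mem_cons_of_mem _ hp) q (List.mem_cons_of_mem _ hq))
        (fun q hq he => hinj q (List.mem_cons_of_mem _ hq) (x, a) List.mem_cons_self he)
        (fun hex => fold_pStep_mem_self x a tl s hex)
        (fun q hq hlt => fold_pStep_mem_partner x a tl s q hq hlt)
    · rw [if_neg (by simp [h])]
      have hfold : tl.foldl (pStep x a) s = s := by
        apply fold_pStep_noop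
        · intro q hq hlt
          exact hC2 q (List.mem_cons_of_mem _ hq) (by omega)
        · rintro ⟨q, hq, hlt⟩
          by_cases ha : a = m
          · have hx : x = x0 := hx0 (x, a) List.mem_cons_self ha
            rw [hx]
            exact hC1 ⟨q, List.mem_cons_of_mem _ hq, by omega⟩
          · exact hC2 (x, a) List.mem_cons_self (by omega)
      rw [hfold]
      exact ih m x0 s
        (fun p hp q hq => hinj p (List.mem_cons_of_mem _ hp) q (List.mem_cons_of_mem _ hq))
        (fun q hq => hx0 q (List.mem_cons_of_mem _ hq))
        (fun ⟨q, hq, hlt⟩ => hC1 ⟨q, List.mem_cons_of_mem _ hq, hlt⟩)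
        (fun q hq => hC2 q (List.mem_cons_of_mem _ hq))

theorem pRec_eq_bRecP_none (ps : List (Int × Int))
    (hinj : ∀ p ∈ ps, ∀ q ∈ ps, p.2 = q.2 → p.1 = q.1) (s : PySem.Set Int) :
    pRec ps s = (bRecP none ps s).1 := by
  cases ps with
  | nil => rfl
  | cons xa tl =>
    obtain ⟨x, a⟩ := xa
    rw [pRec, bRecP, if_pos rfl]
    exact pRec_eq_bRecP tl a x (tl.foldl (pStep x a) s)
      (fun p hp q hq => hinj p (List.mem_cons_of_mem _ hp) q (List.mem_cons_of_mem _ hq))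
      (fun q hq he => hinj q (List.mem_cons_of_mem _ hq) (x, a) List.mem_cons_self he)
      (fun hex => fold_pStep_mem_self x a tl s hex)
      (fun q hq hlt => fold_pStep_mem_partner x a tl s q hq hlt)

-- ---------- the index dict maps distinct keys to distinct positions ----------
theorem get?_foldl_enum (l : List Int) :
    ∀ (n : Nat) (d : PySem.Dict Int Int) (k v : Int),
      PySem.Dict.get?
          ((PySem.List.enumerate l (n : Int)).foldl
            (fun d p => PySem.Dict.insert d p.2 p.1) d) k = some v →
      PySem.Dict.get? d k = some v ∨
        ∃ i : Nat, i < l.length ∧ v = ((n + i : Nat) : Int) ∧ l.getD i 0 = k := by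
  induction l with
  | nil =>
    intro n d k v h
    rw [PySem.List.enumerate_nil, List.foldl_nil] at h
    exact Or.inl h
  | cons x xs ih =>
    intro n d k v h
    rw [PySem.List.enumerate_cons, List.foldl_cons] at h
    have hcast : ((n : Int) + 1) = ((n + 1 : Nat) : Int) := by push_cast; ring
    rw [hcast] at h
    rcases ih (n + 1) _ k v h with h0 | ⟨i, hi, hv, hk⟩
    · rw [PySem.Dict.get?_insert] at h0
      split_ifs at h0 with hkx
      · refine Or.inr ⟨0, by simp, ?_, by simp [hkx]⟩
        simpa using h0.symm
      · exact Or.inl h0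
    · refine Or.inr ⟨i + 1, by simpa using hi, ?_, by simpa using hk⟩
      rw [hv]; congr 1; omega

theorem get?_pvIndexDict (l : List Int) (k v : Int)
    (h : PySem.Dict.get? (pvIndexDict l) k = some v) :
    ∃ i : Nat, i < l.length ∧ v = (i : Int) ∧ l.getD i 0 = k := by
  have h' := h
  unfold pvIndexDict at h'
  have hc : PySem.List.enumerate l = PySem.List.enumerate l ((0 : Nat) : Int) := by
    norm_num
  rw [hc] at h'
  rcases get?_foldl_enum l 0 PySem.Dict.empty k v h' with h0 | ⟨i, hi, hv, hk⟩
  · rw [PySem.Dict.get?_empty] at h0; cases h0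
  · exact ⟨i, hi, by simpa using hv, hk⟩

theorem presOf_inj (ot : List Int) (base : List Int) :
    ∀ p ∈ presOf (pvIndexDict ot) base, ∀ q ∈ presOf (pvIndexDict ot) base,
      p.2 = q.2 → p.1 = q.1 := by
  intro p hp q hq he
  unfold presOf at hp hq
  rw [List.mem_filterMap] at hp hq
  obtain ⟨np, _, hfp⟩ := hp
  obtain ⟨nq, _, hfq⟩ := hq
  cases hgp : PySem.Dict.get? (pvIndexDict ot) np with
  | none => rw [hgp] at hfp; cases hfp
  | some vp =>
    cases hgq : PySem.Dict.get? (pvIndexDict ot) nq with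
    | none => rw [hgq] at hfq; cases hfq
    | some vq =>
      rw [hgp] at hfp; rw [hgq] at hfq
      simp only [Option.map_some, Option.some.injEq] at hfp hfq
      obtain ⟨ip, _, hvp, hkp⟩ := get?_pvIndexDict ot np vp hgp
      obtain ⟨iq, _, hvq, hkq⟩ := get?_pvIndexDict ot nq vq hgq
      have hp1 : p.1 = np := by rw [← hfp]
      have hp2 : p.2 = vp := by rw [← hfp]
      have hq1 : q.1 = nq := by rw [← hfq]
      have hq2 : q.2 = vq := by rw [← hfq]
      have hvv : vp = vq := by rw [← hp2, ← hq2, he]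
      have hii : ip = iq := by
        have : (ip : Int) = (iq : Int) := by rw [← hvp, ← hvq, hvv]
        exact_mod_cast this
      rw [hp1, hq1, ← hkp, ← hkq, hii]

-- ===== VERDICT (by name: the statement is the Claim_ definition above) =====
theorem compare_tour_orders_spec : Claim_equal_compare_tour_orders := by
  intro base_tour other_tour _
  show compare_tour_orders base_tour other_tour
    = compare_tour_orders_alt base_tour other_tour
  rw [portA_eq, portB_eq]
  exact pRec_eq_bRecP_none _ (presOf_inj (pvTrim other_tour) (pvTrim base_tour)) _
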